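-- pv_equiv track=rewrite | github.com/AnkitLamsal/cryptography-lab | 4. Vigerene Cipher/vigerene.py | char_to_num
-- ===== SOURCE A (Python) =====
-- def char_to_num(value):
--     alphabet = 'abcdefghijklmnopqrstuvwxyz'
--     value_len = list()
--     for i in range(len(value)):
--         for j in range(len(alphabet)):
--             if value[i] == alphabet[j]:
--                 value_len.append(j)
--     return value_len
-- ===== SOURCE B (Python) =====
-- def char_to_num(value):
--     result = []
--     for c in value:
--         if 'a' <= c <= 'z':
--             result.append(ord(c) - ord('a'))
--     return result
-- ===== Notes on version B (the rewrite author's own statement) =====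
-- stated objective: faster
-- what changed: Replaces the nested scan over the 26-letter alphabet (index loop with string indexing) by a single pass over the characters computing the index arithmetically as ord(c)-ord('a') under a range guard.
import Mathlib
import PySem

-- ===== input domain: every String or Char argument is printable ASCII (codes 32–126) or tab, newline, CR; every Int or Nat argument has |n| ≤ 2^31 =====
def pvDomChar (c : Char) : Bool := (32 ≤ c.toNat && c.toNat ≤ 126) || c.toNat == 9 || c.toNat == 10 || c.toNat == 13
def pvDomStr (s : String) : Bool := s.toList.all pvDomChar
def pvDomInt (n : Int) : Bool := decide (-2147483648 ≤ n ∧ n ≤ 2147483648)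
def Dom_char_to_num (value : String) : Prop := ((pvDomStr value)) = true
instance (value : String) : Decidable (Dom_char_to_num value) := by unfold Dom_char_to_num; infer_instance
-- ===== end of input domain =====

-- B replaces A's inner linear search of the alphabet string by direct arithmetic ord(c)-ord('a') in one pass (constant-factor faster).

-- ===== PORT A =====
-- for i in range(len(value)): for j in range(len(alphabet)): if value[i] == alphabet[j]: append j
-- (indices i, j are always in range, so pyGetD with a dummy default is exact here)
def char_to_num (value : String) : List Int :=
  let alphabet : List Char := "abcdefghijklmnopqrstuvwxyz".toList
  (PySem.List.pyRange 0 (value.toList.length : Int) 1).foldl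
    (fun acc i =>
      (PySem.List.pyRange 0 (alphabet.length : Int) 1).foldl
        (fun acc2 j =>
          if PySem.List.pyGetD value.toList i ' ' = PySem.List.pyGetD alphabet j ' '
          then acc2 ++ [j] else acc2) acc) []

-- ===== PORT B =====
-- for c in value: if 'a' <= c <= 'z': result.append(ord(c) - ord('a'))
def char_to_num_alt (value : String) : List Int :=
  value.toList.foldl
    (fun acc c => if 'a' ≤ c ∧ c ≤ 'z' then acc ++ [(c.toNat : Int) - 97] else acc) []

-- ===== PRECONDITION & SPEC =====
def Spec_char_to_num (value : String) (out : List Int) : Prop := out = char_to_num_alt value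
instance (value : String) (out : List Int) : Decidable (Spec_char_to_num value out) := by unfold Spec_char_to_num; infer_instance

-- ===== CLAIM (what is proved, stated in full; the proofs are below) =====
def Claim_equal_char_to_num : Prop := ∀ (value : String), Dom_char_to_num value → Spec_char_to_num value (char_to_num value)

-- ===== LEMMAS AND PROOFS =====

-- A's inner alphabet scan, as a function of the current character (result with empty accumulator)
def pvInner (c : Char) : List Int :=
  (PySem.List.pyRange 0 (("abcdefghijklmnopqrstuvwxyz".toList.length : Nat) : Int) 1).foldl
    (fun acc2 j =>
      if c = PySem.List.pyGetD "abcdefghijklmnopqrstuvwxyz".toList j ' '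
      then acc2 ++ [j] else acc2) []

-- a conditional-append fold factors its accumulator out
theorem pv_factor {β : Type} (P : β → Prop) [DecidablePred P] (f : β → Int)
    (l : List β) (acc : List Int) :
    l.foldl (fun a x => if P x then a ++ [f x] else a) acc
      = acc ++ l.foldl (fun a x => if P x then a ++ [f x] else a) [] := by
  induction l generalizing acc with
  | nil => simp
  | cons x xs ih =>
      simp only [List.foldl_cons]
      by_cases h : P x
      · rw [if_pos h, if_pos h, ih (acc ++ [f x]), ih ([] ++ [f x])]
        simp
      · rw [if_neg h, if_neg h, ih acc]

-- the inner fold only appends, so the accumulator factors out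
theorem pvInner_acc (c : Char) (acc : List Int) :
    (PySem.List.pyRange 0 (("abcdefghijklmnopqrstuvwxyz".toList.length : Nat) : Int) 1).foldl
      (fun acc2 j =>
        if c = PySem.List.pyGetD "abcdefghijklmnopqrstuvwxyz".toList j ' '
        then acc2 ++ [j] else acc2) acc = acc ++ pvInner c := by
  unfold pvInner
  exact pv_factor (fun j => c = PySem.List.pyGetD "abcdefghijklmnopqrstuvwxyz".toList j ' ') (fun j => j) _ acc

-- on every domain character the scan result is the arithmetic index (or nothing)
theorem pvInner_eval (c : Char) (h : pvDomChar c = true) :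
    pvInner c = if 'a' ≤ c ∧ c ≤ 'z' then [(c.toNat : Int) - 97] else [] := by
  have hn : c.toNat < 127 := by
    simp only [pvDomChar, Bool.or_eq_true, Bool.and_eq_true, decide_eq_true_eq, beq_iff_eq] at h
    omega
  have hc : Char.ofNat c.toNat = c := Char.ofNat_toNat c
  rw [← hc]
  revert hn
  generalize c.toNat = n
  revert n
  set_option maxRecDepth 100000 in
  set_option maxHeartbeats 1000000 in
  decide

theorem inner_fold_eq (c : Char) (h : pvDomChar c = true) (acc : List Int) :
    (PySem.List.pyRange 0 (("abcdefghijklmnopqrstuvwxyz".toList.length : Nat) : Int) 1).foldl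
      (fun acc2 j =>
        if c = PySem.List.pyGetD "abcdefghijklmnopqrstuvwxyz".toList j ' '
        then acc2 ++ [j] else acc2) acc
    = if 'a' ≤ c ∧ c ≤ 'z' then acc ++ [(c.toNat : Int) - 97] else acc := by
  rw [pvInner_acc, pvInner_eval c h]
  split <;> simp

theorem fold_chars (l : List Char) (h : l.all pvDomChar = true) (acc : List Int) :
    l.foldl
      (fun acc c =>
        (PySem.List.pyRange 0 (("abcdefghijklmnopqrstuvwxyz".toList.length : Nat) : Int) 1).foldl
          (fun acc2 j =>
            if c = PySem.List.pyGetD "abcdefghijklmnopqrstuvwxyz".toList j ' '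
            then acc2 ++ [j] else acc2) acc) acc
    = l.foldl (fun acc c => if 'a' ≤ c ∧ c ≤ 'z' then acc ++ [(c.toNat : Int) - 97] else acc) acc := by
  induction l generalizing acc with
  | nil => rfl
  | cons x xs ih =>
      simp only [List.all_cons, Bool.and_eq_true] at h
      simp only [List.foldl_cons]
      rw [inner_fold_eq x h.1, ih h.2]

theorem char_to_num_spec : Claim_equal_char_to_num := by
  intro value hdom
  unfold Spec_char_to_num char_to_num char_to_num_alt
  have h1 := PySem.List.foldl_pyRange_zero_pyGetD' (xs := value.toList) (d := ' ')
    (init := ([] : List Int))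
    (f := fun acc c =>
      (PySem.List.pyRange 0 (("abcdefghijklmnopqrstuvwxyz".toList.length : Nat) : Int) 1).foldl
        (fun acc2 j =>
          if c = PySem.List.pyGetD "abcdefghijklmnopqrstuvwxyz".toList j ' '
          then acc2 ++ [j] else acc2) acc)
  exact h1.trans (fold_chars value.toList hdom [])
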